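-- pv_equiv track=rewrite | github.com/Lesha17/WSI | data_readers.py | get_word_token_ids
-- ===== SOURCE A (Python) =====
-- def get_word_token_ids(all_token_positions, word_positions):
--     all_positions_iter = enumerate(all_token_positions)
--     i, sos_pos = next(all_positions_iter, (None, None))
--     i, current_pos = next(all_positions_iter, (None, None))
--     result = []
--     for word_start, word_end in word_positions:
--         while current_pos is not None and current_pos[0] < word_start:
--             i, current_pos = next(all_positions_iter, (None, None))
--         while current_pos is not None and 0 < current_pos[1] <= word_end:
--             result.append(i)
--             i, current_pos = next(all_positions_iter, (None, None))
--
--     return result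
-- ===== SOURCE B (Python) =====
-- def get_word_token_ids(all_token_positions, word_positions):
--     # Token-outer sweep: iterate enumerated tokens (skipping the SOS token at
--     # index 0) and advance a word pointer inside; `matching` records whether the
--     # current word's start-skip phase has already been passed.
--     result = []
--     wi = 0
--     matching = False
--     for i, (start, end) in enumerate(all_token_positions):
--         if i == 0:
--             continue
--         while True:
--             if wi >= len(word_positions):
--                 return result
--             ws, we = word_positions[wi]
--             if not matching:
--                 if start < ws:
--                     break
--                 matching = True
--             if 0 < end <= we:
--                 result.append(i)
--                 break
--             wi += 1
--             matching = False
--     return result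
-- ===== Notes on version B (the rewrite author's own statement) =====
-- stated objective: alternative
-- what changed: Inverts the merge: B's outer loop runs over the enumerated tokens (skipping index 0) and advances a word pointer plus a phase flag in an inner while, instead of A's outer loop over words pulling tokens from an iterator via two inner whiles.
import Mathlib
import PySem

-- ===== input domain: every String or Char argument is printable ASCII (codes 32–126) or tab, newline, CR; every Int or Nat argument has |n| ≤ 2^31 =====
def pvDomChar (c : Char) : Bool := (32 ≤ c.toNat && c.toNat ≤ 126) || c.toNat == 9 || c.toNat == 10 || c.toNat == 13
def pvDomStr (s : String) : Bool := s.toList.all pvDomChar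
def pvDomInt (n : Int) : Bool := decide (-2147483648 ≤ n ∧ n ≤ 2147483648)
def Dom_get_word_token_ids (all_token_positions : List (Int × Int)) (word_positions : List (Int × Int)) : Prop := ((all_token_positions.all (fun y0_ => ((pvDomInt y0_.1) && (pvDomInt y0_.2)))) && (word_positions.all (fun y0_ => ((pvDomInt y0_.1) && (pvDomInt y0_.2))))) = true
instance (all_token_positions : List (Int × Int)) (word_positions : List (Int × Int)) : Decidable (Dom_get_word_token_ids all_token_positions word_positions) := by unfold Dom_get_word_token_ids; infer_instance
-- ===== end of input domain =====

-- B inverts the merge: the outer loop runs over enumerated tokens with a word pointer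
-- (and a phase flag) advanced inside, instead of A's outer loop over words pulling
-- tokens from an iterator; same cost, different decomposition (objective: alternative).

-- ===== PORT A =====
-- A's first inner while: pull tokens while current start < word_start
def pvA_skip (ws : Int) : List (Int × Int × Int) → List (Int × Int × Int)
  | [] => []
  | (i, s, e) :: ts => if s < ws then pvA_skip ws ts else (i, s, e) :: ts

-- A's second inner while: append i while 0 < current end <= word_end
def pvA_take (we : Int) : List (Int × Int × Int) → List Int × List (Int × Int × Int)
  | [] => ([], [])
  | (i, s, e) :: ts =>
    if 0 < e ∧ e ≤ we then
      let p := pvA_take we ts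
      (i :: p.1, p.2)
    else ([], (i, s, e) :: ts)

-- A's for-loop over word_positions; the remaining iterator is the list (head = current_pos)
def pvA_go : List (Int × Int) → List (Int × Int × Int) → List Int
  | [], _ => []
  | (ws, we) :: wss, rem =>
    let rem1 := pvA_skip ws rem
    let p := pvA_take we rem1
    p.1 ++ pvA_go wss p.2

def get_word_token_ids (all_token_positions : List (Int × Int)) (word_positions : List (Int × Int)) : List Int :=
  -- enumerate, then the two initial next() calls drop the SOS entry and leave the rest
  let enum := (PySem.List.enumerate all_token_positions).map (fun p => (p.1, p.2.1, p.2.2))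
  pvA_go word_positions (enum.drop 1)

-- ===== PORT B =====
-- B's single sweep: outer recursion over the token list, inner advance over words;
-- m is the `matching` flag (start-skip phase of the current word already passed).
def pvB_go : List (Int × Int × Int) → List (Int × Int) → Bool → List Int
  | [], _, _ => []
  | _ :: _, [], _ => []
  | (i, s, e) :: ts, (ws, we) :: wss, m =>
    if m = false ∧ s < ws then pvB_go ts ((ws, we) :: wss) false
    else if 0 < e ∧ e ≤ we then i :: pvB_go ts ((ws, we) :: wss) true
    else pvB_go ((i, s, e) :: ts) wss false
  termination_by ts wss _ => ts.length + wss.length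

def get_word_token_ids_alt (all_token_positions : List (Int × Int)) (word_positions : List (Int × Int)) : List Int :=
  let enum := (PySem.List.enumerate all_token_positions).map (fun p => (p.1, p.2.1, p.2.2))
  pvB_go (enum.drop 1) word_positions false

-- ===== PRECONDITION & SPEC =====
def Spec_get_word_token_ids (all_token_positions : List (Int × Int)) (word_positions : List (Int × Int)) (out : List Int) : Prop := out = get_word_token_ids_alt all_token_positions word_positions
instance (all_token_positions : List (Int × Int)) (word_positions : List (Int × Int)) (out : List Int) : Decidable (Spec_get_word_token_ids all_token_positions word_positions out) := by unfold Spec_get_word_token_ids; infer_instance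

-- ===== CLAIM (what is proved, stated in full; the proofs are below) =====
def Claim_equal_get_word_token_ids : Prop := ∀ (all_token_positions : List (Int × Int)) (word_positions : List (Int × Int)), Dom_get_word_token_ids all_token_positions word_positions → Spec_get_word_token_ids all_token_positions word_positions (get_word_token_ids all_token_positions word_positions)

-- ===== LEMMAS AND PROOFS =====

theorem pvB_go_nil_words (rem : List (Int × Int × Int)) (m : Bool) :
    pvB_go rem [] m = [] := by
  cases rem <;> simp [pvB_go]

-- once past the skip phase, the flag value no longer matters for the head token
theorem pvB_go_skip (ws we : Int) (wss : List (Int × Int)) (rem : List (Int × Int × Int)) :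
    pvB_go rem ((ws, we) :: wss) false = pvB_go (pvA_skip ws rem) ((ws, we) :: wss) true := by
  induction rem with
  | nil => simp [pvB_go, pvA_skip]
  | cons t ts ih =>
    obtain ⟨i, s, e⟩ := t
    by_cases h : s < ws
    · simpa [pvB_go, pvA_skip, h] using ih
    · simp [pvB_go, pvA_skip, h]

theorem pvB_go_take (we : Int) (wss : List (Int × Int)) (ws : Int) (rem : List (Int × Int × Int)) :
    pvB_go rem ((ws, we) :: wss) true =
      (pvA_take we rem).1 ++ pvB_go (pvA_take we rem).2 wss false := by
  induction rem with
  | nil => simp [pvB_go, pvA_take]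
  | cons t ts ih =>
    obtain ⟨i, s, e⟩ := t
    by_cases h : 0 < e ∧ e ≤ we
    · simp [pvB_go, pvA_take, h, ih]
    · simp [pvB_go, pvA_take, h]

theorem pvA_eq_pvB (words : List (Int × Int)) (rem : List (Int × Int × Int)) :
    pvA_go words rem = pvB_go rem words false := by
  induction words generalizing rem with
  | nil => simp [pvA_go, pvB_go_nil_words]
  | cons w wss ih =>
    obtain ⟨ws, we⟩ := w
    rw [pvB_go_skip ws we wss rem, pvB_go_take we wss ws (pvA_skip ws rem)]
    simp [pvA_go, ih]

-- ===== VERDICT (by name: the statement is the Claim_ definition above) =====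
theorem get_word_token_ids_spec : Claim_equal_get_word_token_ids := by
  intro toks words _
  unfold Spec_get_word_token_ids get_word_token_ids get_word_token_ids_alt
  exact pvA_eq_pvB words _
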